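-- pv_equiv track=rewrite | github.com/Rajatsharma07/Forecasting-Refugee-inflow-to-European-countries-using-UNHCR-dataset | pyFiles/model_and_evaluation.py | cumsum_seasonality
-- ===== SOURCE A (Python) =====
-- import copy
--
-- def cumsum_seasonality(shift, country):
--     temp2 = copy.deepcopy(country)
--     for i in range(shift*2, len(country)):
--         sum = 0
--         if (i%2 != 0):
--             for j in range(i%shift, i+1, shift):
--                 sum += country[j]
--         if (i%2 == 0):
--             for j in range(i%shift, i+1, shift):
--                 sum += country[j]
--
--         temp2[i] = sum
--     return temp2
-- ===== SOURCE B (Python) =====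
-- def cumsum_seasonality(shift, country):
--     # One pass: maintain a running sum per residue class modulo shift.
--     # Only residues < len(country) ever occur, so the table can stay that small.
--     out = list(country)
--     run = [0] * min(shift, len(country))
--     for i in range(len(country)):
--         r = i % shift
--         run[r] += country[i]
--         if i >= shift * 2:
--             out[i] = run[r]
--     return out
-- ===== Notes on version B (the rewrite author's own statement) =====
-- stated objective: faster
-- what changed: Replaced the per-index rescan of the whole residue class (inner range(i%shift, i+1, shift) loop for every i) by a single left-to-right pass that maintains one running sum per residue class modulo shift.
-- outside the precondition, e.g. on cumsum_seasonality(-1, [1, 2, 3]): A returns [0, 0, 0], B raises IndexError; on cumsum_seasonality(-2, [4, 5, 6, 7]): A returns [0, 0, 0, 0], B raises IndexError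
import Mathlib
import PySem

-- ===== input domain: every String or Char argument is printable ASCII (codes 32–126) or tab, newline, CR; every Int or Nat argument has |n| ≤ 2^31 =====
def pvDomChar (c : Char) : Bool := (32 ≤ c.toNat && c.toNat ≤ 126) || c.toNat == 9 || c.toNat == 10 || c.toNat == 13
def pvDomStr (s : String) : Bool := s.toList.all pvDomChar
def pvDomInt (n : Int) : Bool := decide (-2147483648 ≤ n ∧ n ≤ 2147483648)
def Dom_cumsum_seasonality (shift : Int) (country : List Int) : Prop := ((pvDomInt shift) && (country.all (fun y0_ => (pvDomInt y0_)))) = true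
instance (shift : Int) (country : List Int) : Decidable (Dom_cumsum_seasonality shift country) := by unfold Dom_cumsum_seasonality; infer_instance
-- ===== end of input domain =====

-- B replaces A's per-index rescan of its residue class (inner range(i%shift, i+1, shift) loop)
-- by a single left-to-right pass keeping one running sum per residue class modulo shift;
-- the return value is proved equal on Pre_.


-- ===== PORT A =====
-- loop body of A's outer 'for i' loop (sum computed by the two parity-guarded inner loops,
-- exactly as in the Python; country[j] is in range on every admitted input, pyGetD is exact there)
def pvAStep (shift : Int) (country : List Int) (temp2 : List Int) (i : Int) : List Int :=
  let sum0 : Int := 0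
  let sum1 : Int :=
    if PySem.Int.mod i 2 ≠ 0 then
      (PySem.List.pyRange (PySem.Int.mod i shift) (i + 1) shift).foldl
        (fun s j => s + PySem.List.pyGetD country j 0) sum0
    else sum0
  let sum2 : Int :=
    if PySem.Int.mod i 2 = 0 then
      (PySem.List.pyRange (PySem.Int.mod i shift) (i + 1) shift).foldl
        (fun s j => s + PySem.List.pyGetD country j 0) sum1
    else sum1
  PySem.List.pySetD temp2 i sum2

def cumsum_seasonality (shift : Int) (country : List Int) : List Int :=
  (PySem.List.pyRange (shift * 2) (country.length : Int) 1).foldl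
    (pvAStep shift country) country

-- ===== PORT B =====
-- loop body of B's single pass: state = (out, run); run[r] += country[i]; out[i] = run[r] once i >= shift*2
def pvBStep (shift : Int) (country : List Int) (st : List Int × List Int) (i : Int) : List Int × List Int :=
  let r := PySem.Int.mod i shift
  let run' := PySem.List.pySetD st.2 r (PySem.List.pyGetD st.2 r 0 + PySem.List.pyGetD country i 0)
  let out' := if i ≥ shift * 2 then PySem.List.pySetD st.1 i (PySem.List.pyGetD run' r 0) else st.1
  (out', run')

def cumsum_seasonality_alt (shift : Int) (country : List Int) : List Int :=
  let run0 : List Int := List.replicate (min shift (country.length : Int)).toNat 0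
  ((PySem.List.pyRange 0 (country.length : Int) 1).foldl (pvBStep shift country) (country, run0)).1

-- ===== PRECONDITION & SPEC =====
-- Pre_ excludes non-positive shift: with shift = 0 Python's i % 0 raises ZeroDivisionError on any
-- nonempty list (and B raises there too), and with shift < 0 A either raises IndexError or returns
-- via Python's negative-index wraparound while B raises IndexError (its residue table is empty).
def Pre_cumsum_seasonality (shift : Int) (country : List Int) : Prop :=
  1 ≤ shift ∨ (shift = 0 ∧ country = [])
instance (shift : Int) (country : List Int) : Decidable (Pre_cumsum_seasonality shift country) := by
  unfold Pre_cumsum_seasonality; infer_instance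

def pvWitness_cumsum_seasonality : Int × List Int := (2, [1, 2, 3, 4, 5, 6])

def Spec_cumsum_seasonality (shift : Int) (country : List Int) (out : List Int) : Prop := out = cumsum_seasonality_alt shift country
instance (shift : Int) (country : List Int) (out : List Int) : Decidable (Spec_cumsum_seasonality shift country out) := by unfold Spec_cumsum_seasonality; infer_instance

-- ===== CLAIM (what is proved, stated in full; the proofs are below) =====
def Claim_equal_cumsum_seasonality : Prop := ∀ (shift : Int) (country : List Int), Dom_cumsum_seasonality shift country → Pre_cumsum_seasonality shift country → Spec_cumsum_seasonality shift country (cumsum_seasonality shift country)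

-- ===== LEMMAS AND PROOFS =====

-- S s c m r = sum of c[j] for j < m with j % s = r (running residue-class sum)
def pvS (s : ℕ) (c : List Int) : ℕ → ℕ → Int
  | 0, _ => 0
  | m + 1, r => pvS s c m r + (if m % s = r then c.getD m 0 else 0)

-- the value written at index k by either program
def pvG (s : ℕ) (c : List Int) (k : ℕ) : Int := pvS s c (k + 1) (k % s)

-- the output after the first m indices have been processed
def pvL (s : ℕ) (c : List Int) (m : ℕ) : List Int :=
  (List.range c.length).map (fun k => if 2 * s ≤ k ∧ k < m then pvG s c k else c.getD k 0)

-- B's residue table after the first m indices have been processed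
def pvR (s : ℕ) (c : List Int) (m : ℕ) : List Int :=
  (List.range (min s c.length)).map (fun r => pvS s c m r)

theorem pvMapGetD (c : List Int) : (List.range c.length).map (fun k => c.getD k 0) = c := by
  apply List.ext_getElem
  · simp
  · intro i h1 h2
    simp [List.getElem?_eq_getElem h2]

theorem pvL_zero (s : ℕ) (c : List Int) : pvL s c 0 = c := by
  unfold pvL
  simpa using pvMapGetD c

theorem pvL_of_le (s : ℕ) (c : List Int) (m : ℕ) (h : m ≤ 2 * s) : pvL s c m = c := by
  unfold pvL
  rw [show ((List.range c.length).map (fun k => if 2 * s ≤ k ∧ k < m then pvG s c k else c.getD k 0))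
      = (List.range c.length).map (fun k => c.getD k 0) from ?_, pvMapGetD c]
  apply List.map_congr_left
  intro k _
  have : ¬(2 * s ≤ k ∧ k < m) := by omega
  simp [this]

theorem pvL_succ (s : ℕ) (c : List Int) (m : ℕ) (_hm : m < c.length) :
    pvL s c (m + 1) = if 2 * s ≤ m then (pvL s c m).set m (pvG s c m) else pvL s c m := by
  unfold pvL
  split
  · apply List.ext_getElem
    · simp
    · intro k h1 h2
      simp only [List.length_map, List.length_range] at h1
      simp only [List.getElem_set, List.getElem_map, List.getElem_range]
      by_cases hk : m = k
      · subst hk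
        have hc : 2 * s ≤ m ∧ m < m + 1 := by omega
        simp [hc]
      · by_cases hc : 2 * s ≤ k ∧ k < m
        · have hc' : 2 * s ≤ k ∧ k < m + 1 := by omega
          simp [hk, hc, hc']
        · have hc' : ¬(2 * s ≤ k ∧ k < m + 1) := by omega
          simp [hk, hc]
          intro h h'
          exact absurd ⟨h, by omega⟩ hc'

  · apply List.map_congr_left
    intro k _
    by_cases hc : 2 * s ≤ k ∧ k < m
    · have hc' : 2 * s ≤ k ∧ k < m + 1 := by omega
      simp [hc, hc']
    · have hc' : ¬(2 * s ≤ k ∧ k < m + 1) := by omega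
      simp [hc]
      intro h h'
      exact absurd ⟨h, by omega⟩ hc'

-- splitting range(r, m+1, s) at its possible last element m
theorem pvRangeSucc (s r m : ℕ) (hs : 0 < s) (hr : r < s) :
    PySem.List.pyRange (r : Int) ((m : Int) + 1) (s : Int) =
      PySem.List.pyRange (r : Int) (m : Int) (s : Int) ++ (if m % s = r then [(m : Int)] else []) := by
  have hsi : (0 : Int) < (s : Int) := by exact_mod_cast hs
  rw [PySem.List.pyRange_of_pos _ _ hsi, PySem.List.pyRange_of_pos _ _ hsi]
  by_cases hrm : r ≤ m
  · -- both counts are the corresponding Nat ceiling divisions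
    have e1 : (if (r : Int) < (m : Int) + 1 then (((m : Int) + 1 - r + s - 1) / s).toNat else 0)
        = (m + 1 - r + s - 1) / s := by
      rw [if_pos (by omega)]
      rw [show ((m : Int) + 1 - r + s - 1) = ((m + 1 - r + s - 1 : ℕ) : Int) by omega]
      rw [← Int.natCast_div, Int.toNat_natCast]
    have e0 : (if (r : Int) < (m : Int) then (((m : Int) - r + s - 1) / s).toNat else 0)
        = (m - r + s - 1) / s := by
      by_cases h : r < m
      · rw [if_pos (by omega)]
        rw [show ((m : Int) - r + s - 1) = ((m - r + s - 1 : ℕ) : Int) by omega]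
        rw [← Int.natCast_div, Int.toNat_natCast]
      · rw [if_neg (by omega)]
        have : m - r + s - 1 = s - 1 := by omega
        rw [this, Nat.div_eq_of_lt (by omega)]
    rw [e0, e1]
    have hmod : m = s * (m / s) + m % s := (Nat.div_add_mod m s).symm
    by_cases hd : m % s = r
    · obtain ⟨q, hq⟩ : ∃ q, m - r = s * q := ⟨m / s, by omega⟩
      have hqz : (m : Int) - (r : Int) = (s : Int) * (q : Int) := by
        have h' := congrArg (Nat.cast : ℕ → ℤ) hq
        push_cast [Nat.cast_sub hrm] at h'
        exact h'
      have c1 : (m + 1 - r + s - 1) / s = q + 1 := by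
        rw [show m + 1 - r + s - 1 = s * q + s by omega, ← Nat.mul_succ,
          Nat.mul_div_cancel_left _ hs]
      have c0 : (m - r + s - 1) / s = q := by
        rw [show m - r + s - 1 = s * q + (s - 1) by omega, Nat.mul_add_div hs,
          Nat.div_eq_of_lt (by omega)]
        omega
      rw [c0, c1, if_pos hd, List.range_succ, List.map_append]
      congr 1
      simp only [List.map_cons, List.map_nil]
      congr 1
      omega
    · have hu : 1 ≤ (m - r) % s := by
        rcases Nat.eq_zero_or_pos ((m - r) % s) with h0 | h1
        · exfalso
          have h2 := (Nat.div_add_mod (m - r) s).symm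
          have h3 : m - r = s * ((m - r) / s) := by omega
          have h4 : m = s * ((m - r) / s) + r := by omega
          have h5 : m % s = (s * ((m - r) / s) + r) % s := by rw [← h4]
          rw [Nat.mul_add_mod, Nat.mod_eq_of_lt hr] at h5
          exact hd h5
        · exact h1
      obtain ⟨q, u, hqu, hu1, hu2⟩ : ∃ q u, m - r = s * q + u ∧ 1 ≤ u ∧ u < s :=
        ⟨(m - r) / s, (m - r) % s, by
          have := (Nat.div_add_mod (m - r) s).symm
          omega, hu, Nat.mod_lt _ hs⟩
      have c1 : (m + 1 - r + s - 1) / s = q + 1 := by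
        rw [show m + 1 - r + s - 1 = s * q + (u + s) by omega, Nat.mul_add_div hs,
          Nat.add_div_right _ hs, Nat.div_eq_of_lt hu2]
      have c0 : (m - r + s - 1) / s = q + 1 := by
        rw [show m - r + s - 1 = s * q + (u - 1 + s) by omega, Nat.mul_add_div hs,
          Nat.add_div_right _ hs, Nat.div_eq_of_lt (by omega)]
      rw [c0, c1, if_neg hd, List.append_nil]
  · -- m < r: both ranges are empty and m % s = m ≠ r
    have h1 : ¬ ((r : Int) < (m : Int)) := by omega
    have h2 : ¬ ((r : Int) < (m : Int) + 1) := by omega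
    have h3 : ¬ (m % s = r) := by
      rw [Nat.mod_eq_of_lt (by omega)]
      omega
    rw [if_neg h1, if_neg h2, if_neg h3]
    simp

theorem pvInnerSum (s : ℕ) (c : List Int) (hs : 0 < s) :
    ∀ (m r : ℕ), r < s → ∀ (init : Int),
      (PySem.List.pyRange (r : Int) (m : Int) (s : Int)).foldl
        (fun acc j => acc + PySem.List.pyGetD c j 0) init = init + pvS s c m r := by
  have hsi : (0 : Int) < (s : Int) := by exact_mod_cast hs
  intro m
  induction m with
  | zero =>
    intro r hr init
    rw [PySem.List.pyRange_of_pos _ _ hsi]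
    rw [if_neg (by omega)]
    simp [pvS]
  | succ m ih =>
    intro r hr init
    rw [show ((m + 1 : ℕ) : Int) = ((m : ℕ) : Int) + 1 by push_cast; ring]
    rw [pvRangeSucc s r m hs hr, List.foldl_append, ih r hr init]
    by_cases hd : m % s = r
    · simp [hd, pvS, add_assoc]
    · simp [hd, pvS]

theorem pvAStepEq (s : ℕ) (c : List Int) (hs : 0 < s) (m : ℕ) (t : List Int) :
    pvAStep (s : Int) c t (m : Int) = PySem.List.pySetD t (m : Int) (pvG s c m) := by
  have hr : m % s < s := Nat.mod_lt _ hs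
  have hinner :
      (PySem.List.pyRange ((m : Int) % (s : Int)) ((m : Int) + 1) (s : Int)).foldl
        (fun acc j => acc + PySem.List.pyGetD c j 0) 0 = pvG s c m := by
    rw [show ((m : Int) % (s : Int)) = ((m % s : ℕ) : Int) by push_cast; ring,
      show ((m : Int) + 1) = ((m + 1 : ℕ) : Int) by push_cast; ring,
      pvInnerSum s c hs (m + 1) (m % s) hr 0, zero_add]
    rfl
  have hmod2 : PySem.Int.mod (m : Int) 2 = (m : Int) % 2 :=
    PySem.Int.mod_eq_emod_of_pos (by omega)
  unfold pvAStep
  by_cases hp : (m : Int) % 2 = 0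
  · rw [hmod2]
    simp [hp, hinner]
  · rw [hmod2]
    simp [hp, hinner]

theorem pvAfold (s : ℕ) (c : List Int) (hs : 0 < s) :
    ∀ m : ℕ, m ≤ c.length →
      (PySem.List.pyRange ((s : Int) * 2) (m : Int) 1).foldl (pvAStep (s : Int) c) c = pvL s c m := by
  intro m
  induction m with
  | zero =>
    intro _
    rw [PySem.List.pyRange_one_eq_nil (by omega)]
    simp [pvL_zero]
  | succ m ih =>
    intro hm
    by_cases h2 : 2 * s ≤ m
    · have ha : ((s : Int) * 2) ≤ (m : Int) := by omega
      rw [show ((m + 1 : ℕ) : Int) = ((m : ℕ) : Int) + 1 by push_cast; ring]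
      rw [PySem.List.pyRange_one_succ_right ha, List.foldl_append, ih (by omega)]
      simp only [List.foldl_cons, List.foldl_nil]
      rw [pvAStepEq s c hs m, PySem.List.pySetD_natCast]
      rw [pvL_succ s c m (by omega), if_pos h2]
    · rw [PySem.List.pyRange_one_eq_nil (by push_cast; omega)]
      simp [pvL_of_le s c (m + 1) (by omega)]

theorem pvR_length (s : ℕ) (c : List Int) (m : ℕ) : (pvR s c m).length = min s c.length := by
  simp [pvR]

theorem pvR_succ (s : ℕ) (c : List Int) (m : ℕ) :
    pvR s c (m + 1) = (pvR s c m).set (m % s) (pvS s c m (m % s) + c.getD m 0) := by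
  apply List.ext_getElem
  · simp [pvR]
  · intro r h1 h2
    simp only [pvR, List.length_map, List.length_range] at h1
    simp only [pvR, List.getElem_set, List.getElem_map, List.getElem_range]
    by_cases hr : m % s = r
    · subst hr
      simp [pvS]
    · simp [pvS, hr]

theorem pvR_getD (s : ℕ) (c : List Int) (m r : ℕ) (hr : r < s) (hrl : r < c.length) :
    (pvR s c m).getD r 0 = pvS s c m r := by
  have hlt : r < (pvR s c m).length := by rw [pvR_length]; omega
  rw [List.getD_eq_getElem _ _ hlt]
  simp [pvR]

theorem pvBStepEq (s : ℕ) (c : List Int) (hs : 0 < s) (m : ℕ) (hm : m < c.length) :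
    pvBStep (s : Int) c (pvL s c m, pvR s c m) (m : Int) = (pvL s c (m + 1), pvR s c (m + 1)) := by
  have hr : m % s < s := Nat.mod_lt _ hs
  have hrl : m % s < c.length := lt_of_le_of_lt (Nat.mod_le _ _) hm
  unfold pvBStep
  rw [PySem.Int.mod_natCast]
  simp only [PySem.List.pySetD_natCast, PySem.List.pyGetD_natCast]
  rw [pvR_getD s c m (m % s) hr hrl, ← pvR_succ s c m]
  have hget : (pvR s c (m + 1)).getD (m % s) 0 = pvG s c m := by
    rw [pvR_getD s c (m + 1) (m % s) hr hrl]
    simp [pvG, pvS]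
  rw [hget]
  congr 1
  rw [pvL_succ s c m hm]
  by_cases h2 : 2 * s ≤ m
  · rw [if_pos h2, if_pos (by omega)]
  · rw [if_neg h2, if_neg (by omega)]

theorem pvBfold (s : ℕ) (c : List Int) (hs : 0 < s) :
    ∀ m : ℕ, m ≤ c.length →
      (PySem.List.pyRange 0 (m : Int) 1).foldl (pvBStep (s : Int) c) (c, pvR s c 0) =
        (pvL s c m, pvR s c m) := by
  intro m
  induction m with
  | zero =>
    intro _
    rw [PySem.List.pyRange_one_eq_nil (by omega)]
    simp [pvL_zero]
  | succ m ih =>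
    intro hm
    rw [show ((m + 1 : ℕ) : Int) = ((m : ℕ) : Int) + 1 by push_cast; ring]
    rw [PySem.List.pyRange_one_succ_right (by omega), List.foldl_append, ih (by omega)]
    simp only [List.foldl_cons, List.foldl_nil]
    exact pvBStepEq s c hs m (by omega)

-- ===== VERDICT (by name: the statement is the Claim_ definition above) =====
theorem cumsum_seasonality_spec : Claim_equal_cumsum_seasonality := by
  intro shift country _dom pre
  unfold Spec_cumsum_seasonality
  rcases pre with hs | ⟨h0, hc⟩
  · obtain ⟨s, rfl⟩ : ∃ s : ℕ, shift = (s : Int) := ⟨shift.toNat, by omega⟩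
    have hs' : 0 < s := by exact_mod_cast hs
    have hA : cumsum_seasonality (s : Int) country = pvL s country country.length := by
      unfold cumsum_seasonality
      exact pvAfold s country hs' country.length le_rfl
    have hR0 : List.replicate (min (s : Int) (country.length : Int)).toNat 0 = pvR s country 0 := by
      rw [show (min (s : Int) (country.length : Int)).toNat = min s country.length by omega]
      apply List.ext_getElem
      · simp [pvR]
      · intro r h1 h2
        simp [pvR, pvS]
    have hB : cumsum_seasonality_alt (s : Int) country = pvL s country country.length := by
      unfold cumsum_seasonality_alt
      rw [hR0]
      exact congrArg Prod.fst (pvBfold s country hs' country.length le_rfl)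
    rw [hA, hB]
  · subst h0 hc; decide
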